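-- pv_equiv track=rewrite | github.com/DanaSwitch/leetcode | HWod/DFS/AI_processor.py | get_processor_combinations
-- ===== SOURCE A (Python) =====
-- def get_combinations(arr, num):
--     """回溯法实现组合"""
--     result = []
--     combo = []
--
--     def backtrack(start):
--         if len(combo) == num:
--             result.append(combo[:])
--             return
--         remaining_needed = num - len(combo)
--         for i in range(start, len(arr) - remaining_needed + 1):
--             combo.append(arr[i])
--             backtrack(i + 1)
--             combo.pop()
--
--     backtrack(0)
--     return result
--
-- def get_processor_combinations(array, num):
--     chain0 = sorted([x for x in array if 0 <= x <= 3])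
--     chain1 = sorted([x for x in array if 4 <= x <= 7])
--     chains = [chain0, chain1]
--
--     if num == 8:
--         if len(array) == 8:
--             return [sorted(array)]
--         return []
--
--     priority_map = {
--         1: [1, 3, 2, 4],
--         2: [2, 4, 3],
--         4: [4],
--     }
--
--     for target_size in priority_map[num]:
--         result = []
--         for chain in chains:
--             if len(chain) == target_size:
--                 for combo in get_combinations(chain, num):
--                     result.append(combo)
--         if result:
--             return result
--
--     return []
-- ===== SOURCE B (Python) =====
-- def get_processor_combinations(array, num):
--     if num == 8:
--         return [sorted(array)] if len(array) == 8 else []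
--     priorities = {1: [1, 3, 2, 4], 2: [2, 4, 3], 4: [4]}[num]
--     chains = [sorted(x for x in array if 0 <= x <= 3),
--               sorted(x for x in array if 4 <= x <= 7)]
--
--     def combos(lst, k):
--         """take-or-skip structural recursion: combinations in index order"""
--         if k == 0:
--             return [[]]
--         if len(lst) < k:
--             return []
--         rest = lst[1:]
--         return [[lst[0]] + c for c in combos(rest, k - 1)] + combos(rest, k)
--
--     for size in priorities:
--         picks = [c for chain in chains if len(chain) == size
--                  for c in combos(chain, num)]
--         if picks:
--             return picks
--     return []
-- ===== Notes on version B (the rewrite author's own statement) =====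
-- stated objective: simpler
-- what changed: The mutable backtracking state machine (nested function with shared combo/result lists, index range loop, append/pop) is replaced by a pure take-or-skip structural recursion on the chain that returns the same combinations in the same lexicographic index order, and the per-chain accumulation loop by a comprehension; the priority control flow is kept.
import Mathlib
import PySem

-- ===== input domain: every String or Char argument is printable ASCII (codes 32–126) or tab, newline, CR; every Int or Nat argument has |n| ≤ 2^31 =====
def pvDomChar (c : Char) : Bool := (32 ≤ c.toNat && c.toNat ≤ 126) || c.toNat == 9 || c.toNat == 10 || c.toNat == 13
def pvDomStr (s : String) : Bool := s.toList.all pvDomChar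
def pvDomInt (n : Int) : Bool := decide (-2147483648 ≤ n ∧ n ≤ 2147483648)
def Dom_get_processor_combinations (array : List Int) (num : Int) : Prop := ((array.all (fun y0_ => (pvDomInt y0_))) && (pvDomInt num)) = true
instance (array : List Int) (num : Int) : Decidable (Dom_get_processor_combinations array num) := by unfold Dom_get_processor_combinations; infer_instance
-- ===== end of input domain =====

-- B replaces A's mutable backtracking state machine by a pure take-or-skip recursion
-- producing the same combinations in the same order (objective: simpler).

-- ===== PORT A =====
-- backtrack(start) of get_combinations; the shared `combo` list and growing `result`
-- become explicit parameters / the returned list.  `num` reaching get_combinations is a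
-- key of priority_map (1, 2 or 4), hence passed as a Nat at the call site; on those calls
-- Nat subtraction in `num - combo.length` and `arr.length + 1 - rem - start` equals
-- Python's int arithmetic (the range is empty exactly when Python's is), and
-- `arr.getD i 0` equals Python's arr[i] since every generated index is in range.
def pvBacktrackA (arr : List Int) (num : Nat) (combo : List Int) (start : Nat) :
    List (List Int) :=
  if combo.length = num then [combo]
  else
    let rem := num - combo.length
    (List.range' start (arr.length + 1 - rem - start)).attach.flatMap
      (fun i => pvBacktrackA arr num (combo ++ [arr.getD i.1 0]) (i.1 + 1))
termination_by arr.length + 2 - start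
decreasing_by
  have h := List.mem_range'_1.mp i.2
  omega

-- the `for target_size in priority_map[num]` loop with its early return
def pvLoopA (chains : List (List Int)) (num : Int) : List Int → List (List Int)
  | [] => []
  | t :: rest =>
    let result := chains.foldl
      (fun result chain =>
        if (chain.length : Int) = t then result ++ pvBacktrackA chain num.toNat [] 0
        else result) []
    if result = [] then pvLoopA chains num rest else result

def get_processor_combinations (array : List Int) (num : Int) : List (List Int) :=
  let chain0 := PySem.List.sorted (array.filter (fun x => decide (0 ≤ x) && decide (x ≤ 3))) id
  let chain1 := PySem.List.sorted (array.filter (fun x => decide (4 ≤ x) && decide (x ≤ 7))) id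
  let chains := [chain0, chain1]
  if num = 8 then
    if (array.length : Int) = 8 then [PySem.List.sorted array id] else []
  else
    let priority_map : PySem.Dict Int (List Int) :=
      PySem.Dict.ofList [(1, [1, 3, 2, 4]), (2, [2, 4, 3]), (4, [4])]
    match priority_map.get? num with
    | none => []          -- Python raises KeyError here; excluded by Pre_
    | some prios => pvLoopA chains num prios

-- ===== PORT B =====
-- combos(lst, k): take-or-skip recursion
def pvCombosB (lst : List Int) (k : Int) : List (List Int) :=
  if k = 0 then [[]]
  else if (lst.length : Int) < k then []
  else
    match lst with
    | [] => []            -- Python's lst[0] would raise; unreachable for k ≥ 0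
    | x :: rest => ((pvCombosB rest (k - 1)).map (fun c => x :: c)) ++ pvCombosB rest k
termination_by lst.length
decreasing_by all_goals (simp_all)

-- the `for size in priorities` loop with its early return
def pvLoopB (chains : List (List Int)) (num : Int) : List Int → List (List Int)
  | [] => []
  | size :: rest =>
    let picks := chains.flatMap
      (fun chain => if (chain.length : Int) = size then pvCombosB chain num else [])
    if picks.isEmpty then pvLoopB chains num rest else picks

def get_processor_combinations_alt (array : List Int) (num : Int) : List (List Int) :=
  if num = 8 then
    if (array.length : Int) = 8 then [PySem.List.sorted array id] else []
  else
    match (PySem.Dict.ofList [(1, [1, 3, 2, 4]), (2, [2, 4, 3]), (4, [4])] :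
        PySem.Dict Int (List Int)).get? num with
    | none => []          -- Python raises KeyError here; excluded by Pre_
    | some priorities =>
      let chains :=
        [PySem.List.sorted (array.filter (fun x => decide (0 ≤ x) && decide (x ≤ 3))) id,
         PySem.List.sorted (array.filter (fun x => decide (4 ≤ x) && decide (x ≤ 7))) id]
      pvLoopB chains num priorities

-- ===== PRECONDITION & SPEC =====
-- Pre_ excludes exactly the inputs where both A and B raise KeyError: num not a key of
-- priority_map and not 8.
def Pre_get_processor_combinations (array : List Int) (num : Int) : Prop :=
  num = 1 ∨ num = 2 ∨ num = 4 ∨ num = 8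
instance (array : List Int) (num : Int) : Decidable (Pre_get_processor_combinations array num) := by
  unfold Pre_get_processor_combinations; infer_instance

def pvWitness_get_processor_combinations : List Int × Int := ([0, 1, 4, 5, 2], 2)

def Spec_get_processor_combinations (array : List Int) (num : Int) (out : List (List Int)) : Prop := out = get_processor_combinations_alt array num
instance (array : List Int) (num : Int) (out : List (List Int)) : Decidable (Spec_get_processor_combinations array num out) := by unfold Spec_get_processor_combinations; infer_instance

-- ===== CLAIM (what is proved, stated in full; the proofs are below) =====
def Claim_equal_get_processor_combinations : Prop := ∀ (array : List Int) (num : Int), Dom_get_processor_combinations array num → Pre_get_processor_combinations array num → Spec_get_processor_combinations array num (get_processor_combinations array num)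

-- ===== LEMMAS AND PROOFS =====

lemma pvFlatMap_attach {α β : Type} (l : List α) (g : α → List β) :
    l.attach.flatMap (fun i => g i.1) = l.flatMap g := by
  conv_rhs => rw [← List.attach_map_subtype_val l]
  rw [List.flatMap_map]

lemma pvCombosB_zero (lst : List Int) : pvCombosB lst 0 = [[]] := by
  rw [pvCombosB.eq_def]; simp

lemma pvCombosB_nil {k : Int} (h : k ≠ 0) : pvCombosB [] k = [] := by
  rw [pvCombosB.eq_def]; simp [h]

lemma pvCombosB_cons_small (x : Int) (rest : List Int) {k : Int} (h : k ≠ 0)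
    (h2 : (((x :: rest : List Int).length : Int)) < k) : pvCombosB (x :: rest) k = [] := by
  rw [pvCombosB.eq_def]; simp only [if_neg h, if_pos h2]

lemma pvCombosB_cons (x : Int) (rest : List Int) {k : Int} (h : k ≠ 0)
    (h2 : ¬ (((x :: rest : List Int).length : Int)) < k) :
    pvCombosB (x :: rest) k = ((pvCombosB rest (k - 1)).map (fun c => x :: c)) ++ pvCombosB rest k := by
  rw [pvCombosB.eq_def]; simp only [if_neg h, if_neg h2]

lemma pvFoldIf (chains : List (List Int)) (p : List Int → Prop) [DecidablePred p]
    (g : List Int → List (List Int)) (acc : List (List Int)) :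
    chains.foldl (fun r c => if p c then r ++ g c else r) acc =
      acc ++ chains.flatMap (fun c => if p c then g c else []) := by
  induction chains generalizing acc with
  | nil => simp
  | cons c cs ih => by_cases h : p c <;> simp [h, ih, List.append_assoc]

-- backtracking from `start` with partial `combo` = all extensions of combo by a
-- combination of the remaining suffix, in the same order
lemma pvBackA_eq (arr : List Int) (n : Nat) :
    ∀ (f start : Nat) (combo : List Int), arr.length - start < f → combo.length ≤ n →
      pvBacktrackA arr n combo start =
        (pvCombosB (arr.drop start) ((n : Int) - combo.length)).map (combo ++ ·) := by
  intro f
  induction f with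
  | zero => intro start combo h _; exact absurd h (Nat.not_lt_zero _)
  | succ f ih =>
    intro start combo hf hlen
    rw [pvBacktrackA]
    by_cases hc : combo.length = n
    · have h0 : ((n : Int) - (combo.length : Int)) = 0 := by omega
      rw [if_pos hc, h0, pvCombosB_zero]
      simp
    · have hlt : combo.length < n := lt_of_le_of_ne hlen hc
      rw [if_neg hc]
      show (List.range' start (arr.length + 1 - (n - combo.length) - start)).attach.flatMap
        (fun i => pvBacktrackA arr n (combo ++ [arr.getD i.1 0]) (i.1 + 1)) = _
      rw [pvFlatMap_attach _ (fun j => pvBacktrackA arr n (combo ++ [arr.getD j 0]) (j + 1))]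
      have hk0 : ((n : Int) - (combo.length : Int)) ≠ 0 := by omega
      by_cases hs : arr.length ≤ start
      · have hcnt : arr.length + 1 - (n - combo.length) - start = 0 := by omega
        rw [List.drop_eq_nil_of_le hs, pvCombosB_nil hk0, hcnt]
        simp
      · rw [Nat.not_le] at hs
        rw [List.drop_eq_getElem_cons hs]
        by_cases hsmall :
            (((arr[start] :: arr.drop (start + 1) : List Int).length : Int)) < (n : Int) - combo.length
        · have hcnt : arr.length + 1 - (n - combo.length) - start = 0 := by
            simp only [List.length_cons, List.length_drop] at hsmall; omega
          rw [pvCombosB_cons_small _ _ hk0 hsmall, hcnt]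
          simp
        · rw [pvCombosB_cons _ _ hk0 hsmall]
          simp only [List.length_cons, List.length_drop] at hsmall
          have hcnt : arr.length + 1 - (n - combo.length) - start =
              (arr.length - (n - combo.length) - start) + 1 := by omega
          rw [hcnt, List.range'_succ, List.flatMap_cons]
          have htail :
              (List.range' (start + 1) (arr.length - (n - combo.length) - start)).flatMap
                (fun i => pvBacktrackA arr n (combo ++ [arr.getD i 0]) (i + 1)) =
              pvBacktrackA arr n combo (start + 1) := by
            rw [pvBacktrackA, if_neg hc]
            show _ = (List.range' (start + 1)
                (arr.length + 1 - (n - combo.length) - (start + 1))).attach.flatMap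
              (fun i => pvBacktrackA arr n (combo ++ [arr.getD i.1 0]) (i.1 + 1))
            rw [pvFlatMap_attach _ (fun j => pvBacktrackA arr n (combo ++ [arr.getD j 0]) (j + 1))]
            congr 2
            omega
          rw [htail, ih (start + 1) combo (by omega) hlen,
            ih (start + 1) (combo ++ [arr.getD start 0]) (by omega) (by simp; omega),
            List.getD_eq_getElem arr 0 hs]
          have hlen' : ((n : Int) - ((combo ++ [arr[start]] : List Int).length : Int)) =
              (n : Int) - combo.length - 1 := by simp; omega
          rw [hlen']
          simp only [List.map_append, List.map_map, Function.comp_def, List.append_assoc,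
            List.singleton_append]

lemma pvChain_eq (chain : List Int) (num : Int) (h : 1 ≤ num) :
    pvBacktrackA chain num.toNat [] 0 = pvCombosB chain num := by
  have h0 : ((num.toNat : Int)) = num := Int.toNat_of_nonneg (by omega)
  have := pvBackA_eq chain num.toNat (chain.length + 1) 0 [] (by omega) (by simp)
  simpa [h0] using this

lemma pvLoop_eq (chains : List (List Int)) (num : Int) (h : 1 ≤ num) :
    ∀ prios, pvLoopA chains num prios = pvLoopB chains num prios := by
  intro prios
  induction prios with
  | nil => rfl
  | cons t rest ih =>
    have hbody : chains.foldl
        (fun result chain =>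
          if (chain.length : Int) = t then result ++ pvBacktrackA chain num.toNat [] 0
          else result) [] =
        chains.flatMap
          (fun chain => if (chain.length : Int) = t then pvCombosB chain num else []) := by
      rw [pvFoldIf chains (fun c => (c.length : Int) = t)]
      rw [List.nil_append]
      congr 1
      funext c
      split_ifs
      · exact pvChain_eq c num h
      · rfl
    simp only [pvLoopA, pvLoopB, hbody, List.isEmpty_iff, ih]

-- ===== VERDICT (by name: the statement is the Claim_ definition above) =====
theorem get_processor_combinations_spec : Claim_equal_get_processor_combinations := by
  intro array num _ hpre
  unfold Spec_get_processor_combinations get_processor_combinations get_processor_combinations_alt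
  rcases hpre with h | h | h | h <;> subst h
  · rw [show ((PySem.Dict.ofList [((1:Int), [(1:Int), 3, 2, 4]), (2, [2, 4, 3]), (4, [4])] :
        PySem.Dict Int (List Int)).get? 1) = some [1, 3, 2, 4] from rfl]
    simp only [show ¬((1:Int) = 8) from by decide, if_false]
    exact pvLoop_eq _ 1 (by omega) _
  · rw [show ((PySem.Dict.ofList [((1:Int), [(1:Int), 3, 2, 4]), (2, [2, 4, 3]), (4, [4])] :
        PySem.Dict Int (List Int)).get? 2) = some [2, 4, 3] from rfl]
    simp only [show ¬((2:Int) = 8) from by decide, if_false]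
    exact pvLoop_eq _ 2 (by omega) _
  · rw [show ((PySem.Dict.ofList [((1:Int), [(1:Int), 3, 2, 4]), (2, [2, 4, 3]), (4, [4])] :
        PySem.Dict Int (List Int)).get? 4) = some [4] from rfl]
    simp only [show ¬((4:Int) = 8) from by decide, if_false]
    exact pvLoop_eq _ 4 (by omega) _
  · simp
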